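-- pv_equiv track=rewrite | github.com/sboomi/advent-of-code | code/2021/python/src/day10.py | check_legal_chunks
-- ===== SOURCE A (Python) =====
-- from typing import Tuple, List
--
-- def check_legal_chunks(chunk: str) -> Tuple[str, str]:
--     """Uses a recursion to determine whether a chunk is valid, incomplete or corrupted.
--
--     It removes all pairs of `()`, `<>`, `[]` and `{}` until the string is empty or its length
--     doesn't move anymore, then returns a status and the processed chunk.
--
--     Incomplete processed chunks will only have opening characters while corrupted chunks
--     will always feature at least one incorrect closing character.
--
--     Parameters
--     ----------
--     chunk : str
--         the initial chunk
--
--     Returns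
--     -------
--     Tuple[str, str]
--         the status (`valid`, `incomplete` or `corrupted`) and the chunk
--     """
--     if not chunk:
--         return "valid", chunk
--
--     len_chunk = len(chunk)
--     new_chunk = chunk.replace("()", "").replace("{}", "").replace("[]", "").replace("<>", "")
--     if len_chunk == len(new_chunk):
--         # Indicates corruption or incompleteness
--         if all([chr in "({[<" for chr in chunk]):
--             return "incomplete", chunk
--         else:
--             return "corrupted", chunk
--
--     return check_legal_chunks(new_chunk)
-- ===== SOURCE B (Python) =====
-- def check_legal_chunks(chunk):
--     """Single-pass stack reduction to the same irreducible chunk, then classify."""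
--     pairs = {")": "(", "}": "{", "]": "[", ">": "<"}
--     stack = []
--     for c in chunk:
--         if stack and pairs.get(c) == stack[-1]:
--             stack.pop()
--         else:
--             stack.append(c)
--     reduced = "".join(stack)
--     if not reduced:
--         return "valid", reduced
--     if all(c in "({[<" for c in reduced):
--         return "incomplete", reduced
--     return "corrupted", reduced
-- ===== Notes on version B (the rewrite author's own statement) =====
-- stated objective: alternative
-- what changed: A repeatedly rescans and rebuilds the whole string with four replace passes until the length stabilises; B makes a single left-to-right pass with a stack, popping a matching opener and pushing otherwise, which yields the same irreducible chunk and classification.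
import Mathlib
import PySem

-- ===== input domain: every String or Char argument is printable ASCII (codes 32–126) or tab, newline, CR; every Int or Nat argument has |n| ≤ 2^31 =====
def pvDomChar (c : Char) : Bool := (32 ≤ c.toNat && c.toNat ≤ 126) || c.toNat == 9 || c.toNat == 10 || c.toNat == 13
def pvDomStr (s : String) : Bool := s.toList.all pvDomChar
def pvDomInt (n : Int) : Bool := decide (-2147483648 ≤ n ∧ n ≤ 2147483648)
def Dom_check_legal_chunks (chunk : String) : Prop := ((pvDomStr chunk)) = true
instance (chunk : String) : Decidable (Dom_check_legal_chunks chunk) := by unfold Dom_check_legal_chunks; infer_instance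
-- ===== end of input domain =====

-- B replaces A's repeated whole-string pair-replace passes by one left-to-right stack pass
-- producing the same irreducible chunk and classification (a different algorithm, same result).

-- ===== PORT A =====

-- replace.go with new = "" only drops characters, so the result is never longer (termination of A)
theorem pvGoLen (old : List Char) : ∀ (fuel : Nat) (l acc : List Char),
    (PySem.Chars.replace.go old [] fuel l acc).length ≤ acc.length + l.length := by
  intro fuel
  induction fuel with
  | zero => intro l acc; rw [PySem.Chars.replace.go.eq_1]; simp
  | succ n ih =>
    intro l acc
    cases l with
    | nil => rw [PySem.Chars.replace.go.eq_2 _ _ _ _ (by omega)]; simp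
    | cons c t =>
      rw [PySem.Chars.replace.go.eq_3]
      by_cases h : old.isPrefixOf (c :: t) = true
      · simp only [h, if_true, List.reverse_nil, List.nil_append]
        calc (PySem.Chars.replace.go old [] n (List.drop old.length (c :: t)) acc).length
            ≤ acc.length + (List.drop old.length (c :: t)).length := ih _ _
          _ ≤ acc.length + (c :: t).length := by
              simp only [List.length_drop]; omega
      · simp only [h]
        calc (PySem.Chars.replace.go old [] n t (c :: acc)).length
            ≤ (c :: acc).length + t.length := ih _ _
          _ ≤ acc.length + (c :: t).length := by
              simp only [List.length_cons]; omega

theorem pvReplaceLen (s : String) (o : String) :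
    (PySem.Str.replace s o "").toList.length ≤ s.toList.length := by
  rw [PySem.Str.toList_replace]
  unfold PySem.Chars.replace
  by_cases h : (o.toList).isEmpty = true
  · simp only [h, if_true]
    have ho : o.toList = [] := List.isEmpty_iff.mp h
    have hfm : (List.flatMap (fun c => c :: ([] : List Char)) s.toList) = s.toList := by
      induction s.toList with
      | nil => rfl
      | cons a l ihl => simp_all
    simp [hfm]
  · rw [if_neg h]
    have := pvGoLen o.toList s.toList.length s.toList []
    simpa using this

def check_legal_chunks (chunk : String) : String × String :=
  if chunk = "" then ("valid", chunk)
  else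
    let len_chunk := PySem.Str.len chunk
    let new_chunk :=
      PySem.Str.replace (PySem.Str.replace (PySem.Str.replace
        (PySem.Str.replace chunk "()" "") "{}" "") "[]" "") "<>" ""
    if len_chunk = PySem.Str.len new_chunk then
      if (chunk.toList.map (fun c => PySem.Chars.isIn [c] "({[<".toList)).all (fun b => b) then
        ("incomplete", chunk)
      else
        ("corrupted", chunk)
    else check_legal_chunks new_chunk
termination_by chunk.toList.length
decreasing_by
  simp only [len_chunk, new_chunk] at *
  simp only [PySem.Str.len_eq] at *
  have h1 := pvReplaceLen chunk "()"
  have h2 := pvReplaceLen (PySem.Str.replace chunk "()" "") "{}"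
  have h3 := pvReplaceLen (PySem.Str.replace (PySem.Str.replace chunk "()" "") "{}" "") "[]"
  have h4 := pvReplaceLen (PySem.Str.replace (PySem.Str.replace (PySem.Str.replace chunk "()" "") "{}" "") "[]" "") "<>"
  omega

-- ===== PORT B =====

def pvPairOf (c : Char) : Option Char :=
  if c = ')' then some '('
  else if c = '}' then some '{'
  else if c = ']' then some '['
  else if c = '>' then some '<'
  else none

-- one loop step of Source B: pop a matching top, otherwise push
def pvStep (st : List Char) (c : Char) : List Char :=
  match st with
  | t :: rest => if pvPairOf c = some t then rest else c :: t :: rest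
  | [] => [c]

def check_legal_chunks_alt (chunk : String) : String × String :=
  let stack := chunk.toList.foldl pvStep []
  let reduced := String.ofList stack.reverse
  if stack = [] then ("valid", reduced)
  else if stack.reverse.all (fun c => PySem.Chars.isIn [c] "({[<".toList) then
    ("incomplete", reduced)
  else ("corrupted", reduced)

-- ===== PRECONDITION & SPEC =====
def Spec_check_legal_chunks (chunk : String) (out : String × String) : Prop := out = check_legal_chunks_alt chunk
instance (chunk : String) (out : String × String) : Decidable (Spec_check_legal_chunks chunk out) := by unfold Spec_check_legal_chunks; infer_instance

-- ===== CLAIM (what is proved, stated in full; the proofs are below) =====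
def Claim_equal_check_legal_chunks : Prop := ∀ (chunk : String), Dom_check_legal_chunks chunk → Spec_check_legal_chunks chunk (check_legal_chunks chunk)

-- ===== LEMMAS AND PROOFS =====

-- an adjacent matching pair cancels under the stack step
theorem pvCancel (x y : Char) (hx : pvPairOf x = none) (hy : pvPairOf y = some x)
    (st v : List Char) :
    List.foldl pvStep st (x :: y :: v) = List.foldl pvStep st v := by
  have h1 : pvStep st x = x :: st := by
    cases st with
    | nil => rfl
    | cons t r => simp [pvStep, hx]
  have h2 : pvStep (x :: st) y = st := by simp [pvStep, hy]
  simp [List.foldl, h1, h2]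

-- the stack pass is invariant under one replace-pass deleting a matching pair
theorem pvGoFoldl (x y : Char) (hx : pvPairOf x = none) (hy : pvPairOf y = some x) :
    ∀ (fuel : Nat) (l acc st : List Char),
    List.foldl pvStep st (PySem.Chars.replace.go [x, y] [] fuel l acc) =
    List.foldl pvStep (List.foldl pvStep st acc.reverse) l := by
  intro fuel
  induction fuel with
  | zero =>
    intro l acc st
    rw [PySem.Chars.replace.go.eq_1]
    simp [List.foldl_append]
  | succ n ih =>
    intro l acc st
    cases l with
    | nil => rw [PySem.Chars.replace.go.eq_2 _ _ _ _ (by omega)]; simp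
    | cons c t =>
      rw [PySem.Chars.replace.go.eq_3]
      by_cases h : ([x, y]).isPrefixOf (c :: t) = true
      · rw [if_pos h]
        obtain ⟨w, hw⟩ := List.isPrefixOf_iff_prefix.mp h
        obtain ⟨rfl, rfl⟩ : x = c ∧ y :: w = t := by simpa using hw
        simp only [List.reverse_nil, List.nil_append, List.length_cons, List.length_nil,
          List.drop_succ_cons, List.drop_zero]
        rw [ih w acc st]
        rw [pvCancel _ _ hx hy]
      · rw [if_neg h]
        rw [ih t (c :: acc) st]
        simp [List.foldl_append]

theorem pvRedReplace (x y : Char) (hx : pvPairOf x = none) (hy : pvPairOf y = some x)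
    (s : List Char) (st : List Char) :
    List.foldl pvStep st (PySem.Chars.replace s [x, y] []) = List.foldl pvStep st s := by
  unfold PySem.Chars.replace
  simp only [List.isEmpty_cons, if_false, Bool.false_eq_true]
  rw [pvGoFoldl x y hx hy s.length s []]
  simp

-- if the pair does not occur, the replace pass is the identity
theorem pvGoId (x y : Char) :
    ∀ (fuel : Nat) (l acc : List Char), ¬ ([x, y] <:+: l) →
    PySem.Chars.replace.go [x, y] [] fuel l acc = acc.reverse ++ l := by
  intro fuel
  induction fuel with
  | zero => intro l acc _; rw [PySem.Chars.replace.go.eq_1]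
  | succ n ih =>
    intro l acc hocc
    cases l with
    | nil => rw [PySem.Chars.replace.go.eq_2 _ _ _ _ (by omega)]; simp
    | cons c t =>
      rw [PySem.Chars.replace.go.eq_3]
      by_cases h : ([x, y]).isPrefixOf (c :: t) = true
      · exact absurd (List.isPrefixOf_iff_prefix.mp h).isInfix hocc
      · rw [if_neg h]
        rw [ih t (c :: acc) (fun hi => hocc (List.infix_cons hi))]
        simp

theorem pvReplaceId (x y : Char) (s : List Char) (hocc : ¬ ([x, y] <:+: s)) :
    PySem.Chars.replace s [x, y] [] = s := by
  unfold PySem.Chars.replace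
  simp only [List.isEmpty_cons, if_false, Bool.false_eq_true]
  rw [pvGoId x y s.length s [] hocc]
  simp

-- if the pair occurs, the replace pass strictly shrinks
theorem pvGoShrink (x y : Char) :
    ∀ (fuel : Nat) (l acc : List Char), l.length ≤ fuel → ([x, y] <:+: l) →
    (PySem.Chars.replace.go [x, y] [] fuel l acc).length < acc.length + l.length := by
  intro fuel
  induction fuel with
  | zero =>
    intro l acc hf hocc
    have : l = [] := List.length_eq_zero_iff.mp (Nat.le_zero.mp hf)
    subst this
    exact absurd (List.eq_nil_of_infix_nil hocc) (by simp)
  | succ n ih =>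
    intro l acc hf hocc
    cases l with
    | nil => exact absurd (List.eq_nil_of_infix_nil hocc) (by simp)
    | cons c t =>
      rw [PySem.Chars.replace.go.eq_3]
      by_cases h : ([x, y]).isPrefixOf (c :: t) = true
      · rw [if_pos h]
        obtain ⟨w, hw⟩ := List.isPrefixOf_iff_prefix.mp h
        obtain ⟨rfl, rfl⟩ : x = c ∧ y :: w = t := by simpa using hw
        have := pvGoLen [x, y] n w acc
        simp only [List.reverse_nil, List.nil_append, List.length_cons, List.length_nil,
          List.drop_succ_cons, List.drop_zero]
        omega
      · rw [if_neg h]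
        obtain ⟨u, v, huv⟩ := hocc
        have hu : u ≠ [] := by
          intro hnil
          subst hnil
          apply h
          rw [List.isPrefixOf_iff_prefix]
          obtain ⟨h1, h2⟩ : x = c ∧ y :: v = t := by simpa using huv
          exact ⟨v, by simp [← h1, ← h2]⟩
        obtain ⟨c', u', rfl⟩ := List.exists_cons_of_ne_nil hu
        have huv' : c = c' ∧ t = u' ++ [x, y] ++ v := by
          simpa [List.cons.injEq, List.cons_append, eq_comm] using huv
        have hocc' : [x, y] <:+: t := ⟨u', v, huv'.2.symm⟩
        have hf' : t.length ≤ n := by simp at hf; omega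
        have := ih t (c :: acc) hf' hocc'
        simp only [List.length_cons] at *
        omega

theorem pvReplaceShrink (x y : Char) (s : List Char) (hocc : [x, y] <:+: s) :
    (PySem.Chars.replace s [x, y] []).length < s.length := by
  unfold PySem.Chars.replace
  simp only [List.isEmpty_cons, if_false, Bool.false_eq_true]
  have := pvGoShrink x y s.length s [] le_rfl hocc
  simpa using this

-- a chunk with no matching-pair occurrence is a fixed point of the stack pass
def pvNoRedex (l : List Char) : Prop :=
  ∀ x y : Char, pvPairOf y = some x → ¬ ([x, y] <:+: l)

theorem pvIrrFoldl : ∀ (l st : List Char), pvNoRedex (st.reverse ++ l) →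
    List.foldl pvStep st l = l.reverse ++ st := by
  intro l
  induction l with
  | nil => intro st _; simp
  | cons c t ih =>
    intro st hnr
    cases st with
    | nil =>
      simp only [List.foldl_cons]
      have : pvStep [] c = [c] := rfl
      rw [this, ih [c] (by simpa using hnr)]
      simp
    | cons s0 rest =>
      by_cases hm : pvPairOf c = some s0
      · exfalso
        apply hnr s0 c hm
        refine ⟨rest.reverse, t, ?_⟩
        simp
      · simp only [List.foldl_cons]
        have : pvStep (s0 :: rest) c = c :: s0 :: rest := by simp [pvStep, hm]
        rw [this, ih (c :: s0 :: rest) (by simpa using hnr)]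
        simp

-- only the four bracket pairs match
theorem pvPairOf_cases (x y : Char) (h : pvPairOf y = some x) :
    (x = '(' ∧ y = ')') ∨ (x = '{' ∧ y = '}') ∨ (x = '[' ∧ y = ']') ∨ (x = '<' ∧ y = '>') := by
  unfold pvPairOf at h
  split_ifs at h with h1 h2 h3 h4 <;> simp_all [eq_comm]

-- B only depends on the final stack
theorem pvAltCongr (a b : String)
    (h : a.toList.foldl pvStep [] = b.toList.foldl pvStep []) :
    check_legal_chunks_alt a = check_legal_chunks_alt b := by
  unfold check_legal_chunks_alt
  rw [h]

theorem pvNeNil (chunk : String) (h0 : ¬ chunk = "") : chunk.toList ≠ [] := by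
  intro hl
  apply h0
  have h := congrArg String.ofList hl
  rw [String.ofList_toList] at h
  simpa using h

-- at a fixed point of the four replace passes no bracket pair occurs, and all four passes are identities
theorem pvFixpoint (chunk : String)
    (hlen : chunk.toList.length =
      (PySem.Str.replace (PySem.Str.replace (PySem.Str.replace
        (PySem.Str.replace chunk "()" "") "{}" "") "[]" "") "<>" "").toList.length) :
    pvNoRedex chunk.toList := by
  set n1 := PySem.Str.replace chunk "()" "" with hn1
  set n2 := PySem.Str.replace n1 "{}" "" with hn2
  set n3 := PySem.Str.replace n2 "[]" "" with hn3
  set n4 := PySem.Str.replace n3 "<>" "" with hn4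
  have le1 := pvReplaceLen chunk "()"
  have le2 := pvReplaceLen n1 "{}"
  have le3 := pvReplaceLen n2 "[]"
  have le4 := pvReplaceLen n3 "<>"
  rw [← hn1] at le1
  rw [← hn2] at le2
  rw [← hn3] at le3
  rw [← hn4] at le4
  have t1 : n1.toList = PySem.Chars.replace chunk.toList ['(', ')'] [] := by
    rw [hn1]; simpa using PySem.Str.toList_replace chunk "()" ""
  have t2 : n2.toList = PySem.Chars.replace n1.toList ['{', '}'] [] := by
    rw [hn2]; simpa using PySem.Str.toList_replace n1 "{}" ""
  have t3 : n3.toList = PySem.Chars.replace n2.toList ['[', ']'] [] := by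
    rw [hn3]; simpa using PySem.Str.toList_replace n2 "[]" ""
  have t4 : n4.toList = PySem.Chars.replace n3.toList ['<', '>'] [] := by
    rw [hn4]; simpa using PySem.Str.toList_replace n3 "<>" ""
  have o1 : ¬ (['(', ')'] <:+: chunk.toList) := by
    intro hocc
    have := pvReplaceShrink '(' ')' chunk.toList hocc
    rw [← t1] at this
    omega
  have f1 : n1.toList = chunk.toList := by rw [t1, pvReplaceId _ _ _ o1]
  have o2 : ¬ (['{', '}'] <:+: chunk.toList) := by
    intro hocc
    have := pvReplaceShrink '{' '}' n1.toList (by rw [f1]; exact hocc)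
    rw [← t2] at this
    omega
  have f2 : n2.toList = chunk.toList := by
    rw [t2, f1, pvReplaceId _ _ _ o2]
  have o3 : ¬ (['[', ']'] <:+: chunk.toList) := by
    intro hocc
    have := pvReplaceShrink '[' ']' n2.toList (by rw [f2]; exact hocc)
    rw [← t3] at this
    omega
  have f3 : n3.toList = chunk.toList := by
    rw [t3, f2, pvReplaceId _ _ _ o3]
  have o4 : ¬ (['<', '>'] <:+: chunk.toList) := by
    intro hocc
    have := pvReplaceShrink '<' '>' n3.toList (by rw [f3]; exact hocc)
    rw [← t4] at this
    omega
  intro x y hp hocc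
  rcases pvPairOf_cases x y hp with ⟨rfl, rfl⟩ | ⟨rfl, rfl⟩ | ⟨rfl, rfl⟩ | ⟨rfl, rfl⟩
  · exact o1 hocc
  · exact o2 hocc
  · exact o3 hocc
  · exact o4 hocc

-- at a fixed point, B leaves the chunk unchanged and the two classifications coincide
theorem pvFixCase (chunk : String) (h0 : ¬ chunk = "")
    (hlen : PySem.Str.len chunk = PySem.Str.len
      (PySem.Str.replace (PySem.Str.replace (PySem.Str.replace
        (PySem.Str.replace chunk "()" "") "{}" "") "[]" "") "<>" "")) :
    check_legal_chunks_alt chunk =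
      (if (chunk.toList.map (fun c => PySem.Chars.isIn [c] "({[<".toList)).all (fun b => b) then
        ("incomplete", chunk)
      else ("corrupted", chunk)) := by
  simp only [PySem.Str.len_eq, Int.natCast_inj] at hlen
  have hnr := pvFixpoint chunk hlen
  have hred : chunk.toList.foldl pvStep [] = chunk.toList.reverse := by
    have := pvIrrFoldl chunk.toList [] (by simpa using hnr)
    simpa using this
  unfold check_legal_chunks_alt
  rw [hred]
  have hne : chunk.toList.reverse ≠ [] := by
    simpa using pvNeNil chunk h0
  rw [if_neg hne]
  simp only [List.reverse_reverse, String.ofList_toList, List.all_map, List.all_eq_true,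
    Function.comp]

theorem pvEmpty : check_legal_chunks "" = check_legal_chunks_alt "" := by
  rw [check_legal_chunks.eq_def]
  simp [check_legal_chunks_alt]

theorem pvMainAux : ∀ (n : Nat) (chunk : String), chunk.toList.length ≤ n →
    check_legal_chunks chunk = check_legal_chunks_alt chunk := by
  intro n
  induction n with
  | zero =>
    intro chunk hle
    have hnil : chunk.toList = [] := List.length_eq_zero_iff.mp (Nat.le_zero.mp hle)
    have hc : chunk = "" := by
      have h := congrArg String.ofList hnil
      rw [String.ofList_toList] at h
      simpa using h
    rw [hc]
    exact pvEmpty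
  | succ n ih =>
    intro chunk hle
    by_cases h0 : chunk = ""
    · rw [h0]; exact pvEmpty
    · rw [check_legal_chunks.eq_def, if_neg h0]
      simp only []
      by_cases hlen : PySem.Str.len chunk = PySem.Str.len
          (PySem.Str.replace (PySem.Str.replace (PySem.Str.replace
            (PySem.Str.replace chunk "()" "") "{}" "") "[]" "") "<>" "")
      · rw [if_pos hlen, pvFixCase chunk h0 hlen]
      · rw [if_neg hlen]
        have h1 := pvReplaceLen chunk "()"
        have h2 := pvReplaceLen (PySem.Str.replace chunk "()" "") "{}"
        have h3 := pvReplaceLen (PySem.Str.replace (PySem.Str.replace chunk "()" "") "{}" "") "[]"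
        have h4 := pvReplaceLen (PySem.Str.replace (PySem.Str.replace (PySem.Str.replace chunk "()" "") "{}" "") "[]" "") "<>"
        simp only [PySem.Str.len_eq, Int.natCast_inj] at hlen
        rw [ih _ (by omega)]
        apply pvAltCongr
        set n1 := PySem.Str.replace chunk "()" "" with hn1
        set n2 := PySem.Str.replace n1 "{}" "" with hn2
        set n3 := PySem.Str.replace n2 "[]" "" with hn3
        have t1 : n1.toList = PySem.Chars.replace chunk.toList ['(', ')'] [] := by
          rw [hn1]; simpa using PySem.Str.toList_replace chunk "()" ""
        have t2 : n2.toList = PySem.Chars.replace n1.toList ['{', '}'] [] := by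
          rw [hn2]; simpa using PySem.Str.toList_replace n1 "{}" ""
        have t3 : n3.toList = PySem.Chars.replace n2.toList ['[', ']'] [] := by
          rw [hn3]; simpa using PySem.Str.toList_replace n2 "[]" ""
        have t4 : (PySem.Str.replace n3 "<>" "").toList = PySem.Chars.replace n3.toList ['<', '>'] [] := by
          simpa using PySem.Str.toList_replace n3 "<>" ""
        rw [t4, pvRedReplace '<' '>' (by decide) (by decide),
            t3, pvRedReplace '[' ']' (by decide) (by decide),
            t2, pvRedReplace '{' '}' (by decide) (by decide),
            t1, pvRedReplace '(' ')' (by decide) (by decide)]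

theorem pvMain (chunk : String) : check_legal_chunks chunk = check_legal_chunks_alt chunk :=
  pvMainAux chunk.toList.length chunk le_rfl

-- ===== VERDICT (by name: the statement is the Claim_ definition above) =====
theorem check_legal_chunks_spec : Claim_equal_check_legal_chunks := by
  intro chunk _
  unfold Spec_check_legal_chunks
  exact pvMain chunk
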